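-- pv_equiv track=rewrite | github.com/zzsfornlp/zmsp | msp2/nn/backends/bktr.py | change_state_dict
-- ===== SOURCE A (Python) =====
-- from collections import OrderedDict
--
-- def change_state_dict(d, cut_mods, del_mods):
--     # -- cut submodule ...
--     for cut_mod in cut_mods:
--         if cut_mod[-1] != '.':
--             cut_mod = cut_mod + "."
--         d2 = OrderedDict()
--         for k, v in d.items():
--             if k.startswith(cut_mod):
--                 d2[k[len(cut_mod):]] = v
--         d = d2
--     # -- del submodule ...
--     for del_mod in del_mods:
--         d2 = OrderedDict()
--         for k, v in d.items():
--             if not k.startswith(del_mod):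
--                 d2[k] = v
--         d = d2
--     # --
--     return d
-- ===== SOURCE B (Python) =====
-- from collections import OrderedDict
--
-- def change_state_dict(d, cut_mods, del_mods):
--     # single pass: one combined cut prefix, one filtered traversal
--     combined = "".join(cm if cm.endswith('.') else cm + '.' for cm in cut_mods)
--     n = len(combined)
--     out = OrderedDict()
--     for k, v in d.items():
--         if k.startswith(combined):
--             k2 = k[n:]
--             if not any(k2.startswith(dm) for dm in del_mods):
--                 out[k2] = v
--     return out
-- ===== Notes on version B (the rewrite author's own statement) =====
-- stated objective: faster
-- what changed: Instead of rebuilding the dict once per cut_mod and once per del_mod, B concatenates the normalized cut prefixes into one combined prefix and builds the result in a single filtered pass over d.items(), testing del prefixes with any().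
import Mathlib
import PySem

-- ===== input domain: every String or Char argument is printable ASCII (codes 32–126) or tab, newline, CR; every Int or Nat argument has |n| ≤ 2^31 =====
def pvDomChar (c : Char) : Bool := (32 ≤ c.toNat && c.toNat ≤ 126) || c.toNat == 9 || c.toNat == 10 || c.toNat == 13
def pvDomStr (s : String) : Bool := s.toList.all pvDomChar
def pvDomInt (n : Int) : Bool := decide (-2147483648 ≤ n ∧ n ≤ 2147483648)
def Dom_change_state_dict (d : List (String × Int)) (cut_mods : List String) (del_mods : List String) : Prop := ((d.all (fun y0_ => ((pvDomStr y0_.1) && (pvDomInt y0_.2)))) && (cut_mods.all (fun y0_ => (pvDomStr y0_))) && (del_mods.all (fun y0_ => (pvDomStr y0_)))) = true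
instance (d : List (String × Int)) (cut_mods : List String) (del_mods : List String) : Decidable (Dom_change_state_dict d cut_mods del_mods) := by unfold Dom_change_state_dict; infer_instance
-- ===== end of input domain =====

-- B replaces A's one-dict-rebuild-per-cut_mod/del_mod with a single combined cut prefix and ONE (measured faster)
-- filtered pass over the items (same return value; the input dict is read through its assoc list).

-- ===== PORT A =====
def change_state_dict (d : List (String × Int)) (cut_mods : List String) (del_mods : List String) : List (String × Int) :=
  let d0 : PySem.Dict String Int := PySem.Dict.ofList d
  let d1 := cut_mods.foldl (fun dd cut_mod =>
    let cm := if PySem.Str.pyGet? cut_mod (-1) ≠ some '.' then cut_mod ++ "." else cut_mod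
    dd.items.foldl (fun d2 kv =>
      if PySem.Str.startswith kv.1 cm then
        d2.insert (PySem.Str.slice kv.1 (some (PySem.Str.len cm)) none) kv.2
      else d2) PySem.Dict.empty) d0
  let d2 := del_mods.foldl (fun dd del_mod =>
    dd.items.foldl (fun d2 kv =>
      if !(PySem.Str.startswith kv.1 del_mod) then d2.insert kv.1 kv.2 else d2) PySem.Dict.empty) d1
  d2.items

-- ===== PORT B =====
def change_state_dict_alt (d : List (String × Int)) (cut_mods : List String) (del_mods : List String) : List (String × Int) :=
  let combined := PySem.Str.join "" (cut_mods.map (fun cm => if PySem.Str.endswith cm "." then cm else cm ++ "."))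
  let n := PySem.Str.len combined
  ((PySem.Dict.ofList d).items.foldl (fun out kv =>
    if PySem.Str.startswith kv.1 combined then
      let k2 := PySem.Str.slice kv.1 (some n) none
      if !(del_mods.any (fun dm => PySem.Str.startswith k2 dm)) then out.insert k2 kv.2 else out
    else out) (PySem.Dict.empty : PySem.Dict String Int)).items

-- ===== PRECONDITION & SPEC =====
-- Pre_ excludes only cut_mods containing "" (there A raises IndexError on cut_mod[-1]).
def Pre_change_state_dict (d : List (String × Int)) (cut_mods : List String) (del_mods : List String) : Prop := "" ∉ cut_mods
instance (d : List (String × Int)) (cut_mods : List String) (del_mods : List String) : Decidable (Pre_change_state_dict d cut_mods del_mods) := by unfold Pre_change_state_dict; infer_instance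
def pvWitness_change_state_dict : (List (String × Int)) × List String × List String :=
  ([("enc.a.x", 1), ("enc.b.y", 2), ("dec.z", 3)], ["enc."], ["b"])

def Spec_change_state_dict (d : List (String × Int)) (cut_mods : List String) (del_mods : List String) (out : List (String × Int)) : Prop := out = change_state_dict_alt d cut_mods del_mods
instance (d : List (String × Int)) (cut_mods : List String) (del_mods : List String) (out : List (String × Int)) : Decidable (Spec_change_state_dict d cut_mods del_mods out) := by unfold Spec_change_state_dict; infer_instance

-- ===== CLAIM (what is proved, stated in full; the proofs are below) =====
def Claim_equal_change_state_dict : Prop := ∀ (d : List (String × Int)) (cut_mods : List String) (del_mods : List String), Dom_change_state_dict d cut_mods del_mods → Pre_change_state_dict d cut_mods del_mods → Spec_change_state_dict d cut_mods del_mods (change_state_dict d cut_mods del_mods)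

-- ===== LEMMAS AND PROOFS =====

def pvStrip (p k : String) : String := PySem.Str.slice k (some (PySem.Str.len p)) none
def pvNorm (cm : String) : String := if PySem.Str.endswith cm "." then cm else cm ++ "."
lemma pvStrip_toList (p k : String) : (pvStrip p k).toList = k.toList.drop p.toList.length := by
  simp only [pvStrip, PySem.Str.toList_slice, PySem.Str.len_eq, PySem.Chars.slice_eq_listSlice]
  rw [PySem.List.slice_from _ (Int.natCast_nonneg _)]
  simp

lemma pvToList_inj {s t : String} (h : s.toList = t.toList) : s = t := by
  exact String.toList_inj.mp h

lemma pvGetLast (l : List Char) (h : l ≠ []) : PySem.List.pyGet? l (-1) = l.getLast? := by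
  have h1 : 1 ≤ l.length := List.length_pos_iff.2 h
  rw [List.getLast?_eq_getElem?]
  simp [PySem.List.pyGet?, PySem.List.pyIdx?, h1]

lemma pvEndsDot (l : List Char) (h : l ≠ []) : (PySem.Chars.endswith l ['.'] = true) ↔ l.getLast? = some '.' := by
  rw [PySem.Chars.endswith_iff]
  constructor
  · rintro ⟨t, rfl⟩; simp
  · intro hg
    obtain rfl | ⟨t, c, rfl⟩ := l.eq_nil_or_concat
    · exact absurd rfl h
    · simp at hg; subst hg; exact ⟨t, by simp⟩

lemma pvNorm_eq_normA (cm : String) (h : cm ≠ "") :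
    (if PySem.Str.pyGet? cm (-1) ≠ some '.' then cm ++ "." else cm) = pvNorm cm := by
  have hl : cm.toList ≠ [] := by
    intro hc; exact h (pvToList_inj (by simp [hc]))
  have hget : PySem.Str.pyGet? cm (-1) = cm.toList.getLast? := by
    simp only [PySem.Str.pyGet?_eq, PySem.Chars.pyGet?_eq_listPyGet?]
    exact pvGetLast _ hl
  unfold pvNorm
  rw [hget, PySem.Str.endswith_eq]
  by_cases hc : cm.toList.getLast? = some '.'
  · simp [hc, (pvEndsDot _ hl).mpr hc]
  · have hne : PySem.Chars.endswith cm.toList ['.'] = false :=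
      Bool.eq_false_iff.mpr fun hh => hc ((pvEndsDot _ hl).mp hh)
    simp [hc, hne]

lemma pvPrefix_append (P Q K : List Char) : (P ++ Q) <+: K ↔ P <+: K ∧ Q <+: K.drop P.length := by
  constructor
  · intro h
    refine ⟨(List.prefix_append P Q).trans h, ?_⟩
    obtain ⟨t, rfl⟩ := h
    simp [List.drop_left']
  · rintro ⟨h1, ⟨t, ht⟩⟩
    have hK := List.prefix_iff_eq_append.mp h1
    exact ⟨t, by rw [← hK, ← ht, List.append_assoc]⟩

lemma pvStartswith_append (k p q : String) :
    PySem.Str.startswith k (p ++ q) = (PySem.Str.startswith k p && PySem.Str.startswith (pvStrip p k) q) := by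
  simp only [PySem.Str.startswith_eq, String.toList_append, pvStrip_toList]
  rcases hb : PySem.Chars.startswith k.toList (p.toList ++ q.toList) with _ | _
  · rw [eq_comm, Bool.and_eq_false_iff]
    rw [Bool.eq_false_iff] at hb
    by_cases h1 : PySem.Chars.startswith k.toList p.toList = true
    · refine Or.inr (Bool.eq_false_iff.mpr fun h2 => hb ?_)
      rw [PySem.Chars.startswith_iff] at *
      exact (pvPrefix_append _ _ _).mpr ⟨h1, h2⟩
    · exact Or.inl (Bool.eq_false_iff.mpr h1)
  · rw [PySem.Chars.startswith_iff, pvPrefix_append] at hb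
    rw [eq_comm, Bool.and_eq_true, PySem.Chars.startswith_iff, PySem.Chars.startswith_iff]
    exact ⟨hb.1, hb.2⟩

lemma pvStrip_strip (p q k : String) : pvStrip q (pvStrip p k) = pvStrip (p ++ q) k := by
  apply String.toList_inj.mp
  simp [pvStrip_toList, List.drop_drop, Nat.add_comm]

def pvCutL (p : String) (l : List (String × Int)) : List (String × Int) :=
  (l.filter (fun kv => PySem.Str.startswith kv.1 p)).map (fun kv => (pvStrip p kv.1, kv.2))

lemma pvCutL_cutL (p q : String) (l : List (String × Int)) :
    pvCutL q (pvCutL p l) = pvCutL (p ++ q) l := by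
  unfold pvCutL
  rw [List.filter_map, List.map_map, List.filter_filter]
  have hF : ((fun kv : String × Int => (pvStrip q kv.1, kv.2)) ∘ fun kv : String × Int => (pvStrip p kv.1, kv.2))
      = fun kv : String × Int => (pvStrip (p ++ q) kv.1, kv.2) := by
    funext kv; simp [pvStrip_strip]
  have hP : (fun kv : String × Int =>
        ((fun kv : String × Int => PySem.Str.startswith kv.1 q) ∘ fun kv : String × Int => (pvStrip p kv.1, kv.2)) kv
          && PySem.Str.startswith kv.1 p)
      = fun kv : String × Int => PySem.Str.startswith kv.1 (p ++ q) := by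
    funext kv; simp only [Function.comp_apply]
    rw [Bool.and_comm, ← pvStartswith_append]
  rw [hF, hP]

lemma pvNodup_strip (p : String) (c : String × Int → Bool)
    (hc : ∀ kv, c kv = true → PySem.Str.startswith kv.1 p = true)
    (l : List (String × Int)) (h : (l.map Prod.fst).Nodup) :
    ((l.filter c).map (fun kv => pvStrip p kv.1)).Nodup := by
  have hsub : ((l.filter c).map Prod.fst).Nodup :=
    h.sublist ((List.filter_sublist (p := c) (l := l)).map Prod.fst)
  have : (l.filter c).map (fun kv => pvStrip p kv.1) = ((l.filter c).map Prod.fst).map (pvStrip p) := by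
    simp [List.map_map]
  rw [this]
  refine hsub.map_on ?_
  intro x hx y hy hxy
  obtain ⟨kx, hkx, rfl⟩ := List.mem_map.mp hx
  obtain ⟨ky, hky, rfl⟩ := List.mem_map.mp hy
  have px : p.toList <+: kx.1.toList := (PySem.Chars.startswith_iff _ _).mp
    (by simpa using hc kx (List.of_mem_filter hkx))
  have py : p.toList <+: ky.1.toList := (PySem.Chars.startswith_iff _ _).mp
    (by simpa using hc ky (List.of_mem_filter hky))
  apply String.toList_inj.mp
  have hd : kx.1.toList.drop p.toList.length = ky.1.toList.drop p.toList.length := by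
    have := congrArg String.toList hxy
    simpa [pvStrip_toList] using this
  rw [← List.prefix_iff_eq_append.mp px, ← List.prefix_iff_eq_append.mp py, hd]

lemma pvDictCut (p : String) (dd : PySem.Dict String Int) (h : dd.keys.Nodup) :
    (dd.items.foldl (fun d2 kv =>
      if PySem.Str.startswith kv.1 p then
        d2.insert (PySem.Str.slice kv.1 (some (PySem.Str.len p)) none) kv.2
      else d2) PySem.Dict.empty).items = pvCutL p dd.items := by
  have hfold : (dd.items.foldl (fun d2 kv =>
      if PySem.Str.startswith kv.1 p then
        d2.insert (PySem.Str.slice kv.1 (some (PySem.Str.len p)) none) kv.2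
      else d2) PySem.Dict.empty)
      = (dd.items.filter (fun kv => PySem.Str.startswith kv.1 p)).foldl
          (fun d2 kv => d2.insert (PySem.Str.slice kv.1 (some (PySem.Str.len p)) none) kv.2)
          PySem.Dict.empty := List.foldl_filter.symm
  rw [hfold]
  rw [PySem.Dict.items_foldl_insert_fresh _
      (fun kv : String × Int => PySem.Str.slice kv.1 (some (PySem.Str.len p)) none)
      (fun kv : String × Int => kv.2) _ (fun a _ => PySem.Dict.contains_empty _)
      (by exact pvNodup_strip p _ (fun _ hkv => hkv) dd.items h)]
  simp [pvCutL, pvStrip, PySem.Dict.empty]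

lemma pvDictDel (p : String) (dd : PySem.Dict String Int) (h : dd.keys.Nodup) :
    (dd.items.foldl (fun d2 kv =>
      if !(PySem.Str.startswith kv.1 p) then d2.insert kv.1 kv.2 else d2) PySem.Dict.empty).items
      = dd.items.filter (fun kv => !(PySem.Str.startswith kv.1 p)) := by
  have hfold : (dd.items.foldl (fun d2 kv =>
      if !(PySem.Str.startswith kv.1 p) then d2.insert kv.1 kv.2 else d2) PySem.Dict.empty)
      = (dd.items.filter (fun kv => !(PySem.Str.startswith kv.1 p))).foldl
          (fun d2 kv => d2.insert kv.1 kv.2) PySem.Dict.empty := List.foldl_filter.symm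
  rw [hfold]
  rw [PySem.Dict.items_foldl_insert_fresh _ (fun kv : String × Int => kv.1) (fun kv : String × Int => kv.2) _
      (fun a _ => PySem.Dict.contains_empty _)
      (h.sublist ((List.filter_sublist (l := dd.items)).map Prod.fst))]
  simp [PySem.Dict.empty]

lemma pvCharsJoin_nil (parts : List (List Char)) : PySem.Chars.join [] parts = parts.flatten := by
  induction parts with
  | nil => rfl
  | cons a t ih =>
    cases t with
    | nil => simp [PySem.Chars.join, List.intercalate]
    | cons b u => simp_all [PySem.Chars.join_cons_cons]

lemma pvJoin_cons (x : String) (xs : List String) :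
    PySem.Str.join "" (x :: xs) = x ++ PySem.Str.join "" xs := by
  apply String.toList_inj.mp
  simp [PySem.Str.toList_join, pvCharsJoin_nil]

lemma pvStrip_empty (k : String) : pvStrip "" k = k := by
  apply String.toList_inj.mp
  simp [pvStrip_toList]

lemma pvCutL_empty (l : List (String × Int)) : pvCutL "" l = l := by
  unfold pvCutL
  rw [List.filter_eq_self.mpr (fun kv _ => by
    rw [PySem.Str.startswith_eq, PySem.Chars.startswith_iff]; simp)]
  have : (fun kv : String × Int => (pvStrip "" kv.1, kv.2)) = id := by
    funext kv; simp [pvStrip_empty]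
  simp [this]

lemma pvCutL_nodup (p : String) (l : List (String × Int)) (h : (l.map Prod.fst).Nodup) :
    ((pvCutL p l).map Prod.fst).Nodup := by
  have := pvNodup_strip p _ (fun _ hkv => hkv) l h
  simpa [pvCutL, List.map_map, Function.comp] using this

lemma pvCutFold (cms : List String) (dd : PySem.Dict String Int) (h : dd.keys.Nodup)
    (hcm : ∀ cm ∈ cms, cm ≠ "") :
    (cms.foldl (fun dd cut_mod =>
       let cm := if PySem.Str.pyGet? cut_mod (-1) ≠ some '.' then cut_mod ++ "." else cut_mod
       dd.items.foldl (fun d2 kv =>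
         if PySem.Str.startswith kv.1 cm then
           d2.insert (PySem.Str.slice kv.1 (some (PySem.Str.len cm)) none) kv.2
         else d2) PySem.Dict.empty) dd).items
    = pvCutL (PySem.Str.join "" (cms.map pvNorm)) dd.items := by
  induction cms generalizing dd with
  | nil => simpa using (pvCutL_empty dd.items).symm
  | cons c cs ih =>
    have hc : c ≠ "" := hcm c (List.mem_cons_self)
    simp only [List.foldl_cons, List.map_cons, pvNorm_eq_normA c hc]
    have hitems := pvDictCut (pvNorm c) dd h
    have hnd : ((pvCutL (pvNorm c) dd.items).map Prod.fst).Nodup := pvCutL_nodup _ _ h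
    rw [pvJoin_cons, ← pvCutL_cutL, ← hitems]
    exact ih _ (by simpa only [PySem.Dict.keys, hitems] using hnd)
      (fun cm hm => hcm cm (List.mem_cons_of_mem _ hm))

lemma pvDelFold (dms : List String) (dd : PySem.Dict String Int) (h : dd.keys.Nodup) :
    (dms.foldl (fun dd del_mod => dd.items.foldl (fun d2 kv =>
        if !(PySem.Str.startswith kv.1 del_mod) then d2.insert kv.1 kv.2 else d2) PySem.Dict.empty) dd).items
    = dd.items.filter (fun kv => !(dms.any (fun dm => PySem.Str.startswith kv.1 dm))) := by
  induction dms generalizing dd with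
  | nil => simp
  | cons m ms ih =>
    simp only [List.foldl_cons]
    have hitems := pvDictDel m dd h
    have hnd : ((dd.items.filter (fun kv => !(PySem.Str.startswith kv.1 m))).map Prod.fst).Nodup :=
      h.sublist ((List.filter_sublist).map Prod.fst)
    rw [ih _ (by simpa only [PySem.Dict.keys, hitems] using hnd), hitems, List.filter_filter]
    congr 1
    funext kv
    simp [Bool.and_comm]

lemma pvAltFold (C : String) (dms : List String) (dd : PySem.Dict String Int) (h : dd.keys.Nodup) :
    (dd.items.foldl (fun out kv =>
      if PySem.Str.startswith kv.1 C then
        let k2 := PySem.Str.slice kv.1 (some (PySem.Str.len C)) none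
        if !(dms.any (fun dm => PySem.Str.startswith k2 dm)) then out.insert k2 kv.2 else out
      else out) PySem.Dict.empty).items
    = (dd.items.filter (fun kv => PySem.Str.startswith kv.1 C
          && !(dms.any (fun dm => PySem.Str.startswith (pvStrip C kv.1) dm)))).map
        (fun kv => (pvStrip C kv.1, kv.2)) := by
  have hfun : (fun (out : PySem.Dict String Int) (kv : String × Int) =>
      if PySem.Str.startswith kv.1 C then
        let k2 := PySem.Str.slice kv.1 (some (PySem.Str.len C)) none
        if !(dms.any (fun dm => PySem.Str.startswith k2 dm)) then out.insert k2 kv.2 else out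
      else out)
      = (fun out kv =>
        if PySem.Str.startswith kv.1 C
            && !(dms.any (fun dm => PySem.Str.startswith (pvStrip C kv.1) dm)) then
          out.insert (PySem.Str.slice kv.1 (some (PySem.Str.len C)) none) kv.2
        else out) := by
    funext out kv
    cases h1 : PySem.Str.startswith kv.1 C <;>
      simp only [h1, Bool.false_and, Bool.true_and, pvStrip] <;> rfl
  rw [hfun]
  have hfold : (dd.items.foldl (fun out kv =>
        if PySem.Str.startswith kv.1 C
            && !(dms.any (fun dm => PySem.Str.startswith (pvStrip C kv.1) dm)) then
          out.insert (PySem.Str.slice kv.1 (some (PySem.Str.len C)) none) kv.2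
        else out) PySem.Dict.empty)
      = (dd.items.filter (fun kv => PySem.Str.startswith kv.1 C
            && !(dms.any (fun dm => PySem.Str.startswith (pvStrip C kv.1) dm)))).foldl
          (fun out kv => out.insert (PySem.Str.slice kv.1 (some (PySem.Str.len C)) none) kv.2)
          PySem.Dict.empty := List.foldl_filter.symm
  rw [hfold]
  rw [PySem.Dict.items_foldl_insert_fresh _
      (fun kv : String × Int => PySem.Str.slice kv.1 (some (PySem.Str.len C)) none)
      (fun kv : String × Int => kv.2) _ (fun a _ => PySem.Dict.contains_empty _)
      (by exact pvNodup_strip C _ (fun kv hkv => by revert hkv; cases PySem.Str.startswith kv.1 C <;> simp) dd.items h)]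
  simp [pvStrip, PySem.Dict.empty]

-- ===== VERDICT (by name: the statement is the Claim_ definition above) =====
theorem change_state_dict_spec : Claim_equal_change_state_dict := by
  intro d cms dms _ hpre
  unfold Pre_change_state_dict at hpre
  unfold Spec_change_state_dict
  unfold change_state_dict change_state_dict_alt
  have hk : ((PySem.Dict.ofList d : PySem.Dict String Int)).keys.Nodup := PySem.Dict.nodup_keys_ofList d
  have hcm : ∀ cm ∈ cms, cm ≠ "" := fun cm hm he => hpre (he ▸ hm)
  have hcut := pvCutFold cms (PySem.Dict.ofList d) hk hcm
  have hnd1 : ((pvCutL (PySem.Str.join "" (cms.map pvNorm)) (PySem.Dict.ofList d : PySem.Dict String Int).items).map Prod.fst).Nodup :=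
    pvCutL_nodup _ _ hk
  have halt := pvAltFold (PySem.Str.join "" (cms.map pvNorm)) dms (PySem.Dict.ofList d) hk
  simp only []
  set D1 := cms.foldl (fun dd cut_mod =>
    let cm := if PySem.Str.pyGet? cut_mod (-1) ≠ some '.' then cut_mod ++ "." else cut_mod
    dd.items.foldl (fun d2 kv =>
      if PySem.Str.startswith kv.1 cm then
        d2.insert (PySem.Str.slice kv.1 (some (PySem.Str.len cm)) none) kv.2
      else d2) PySem.Dict.empty) (PySem.Dict.ofList d : PySem.Dict String Int) with hD1
  rw [pvDelFold dms D1 (by simpa only [PySem.Dict.keys, hcut] using hnd1), hcut]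
  have hmapnorm : (cms.map (fun cm => if PySem.Str.endswith cm "." then cm else cm ++ ".")) = cms.map pvNorm := rfl
  rw [hmapnorm, halt]
  -- LHS: (pvCutL C l).filter c!  ; RHS: map strip (filter (c1 && c2) l)
  unfold pvCutL
  rw [List.filter_map, List.filter_filter]
  congr 1
  refine List.filter_congr fun kv _ => ?_
  simp only [Function.comp_apply]
  exact Bool.and_comm _ _
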